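-- pv_equiv track=rewrite | github.com/Happy-Sloth-Boy/NeverUsedGithubInMyLife | e8.py | check_branch
-- ===== SOURCE A (Python) =====
-- def get_pos_from_xy(x,y,L) :
--     return y*L + x
--
-- def check_branch(x1,y1,x2,y2,H,L):
--     node_list = []
--     K = 1
--     while True :
--         xa = (K+1)*x1 - K*x2
--         ya = (K+1)*y1 - K*y2
--
--         in_map = ( 0 <= xa < L ) and ( 0 <= ya < H )
--         if not in_map :
--             break
--
--         node_list.append(get_pos_from_xy(xa,ya,L))
--         K += 1
--     return node_list
-- ===== SOURCE B (Python) =====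
-- def get_pos_from_xy(x, y, L):
--     return y * L + x
--
-- def axis_kmax(base, step, bound):
--     # bounds on K from requiring 0 <= base + K*step < bound, given it holds at K=1:
--     # step>0 -> only the upper limit binds; step<0 -> only the lower limit binds;
--     # step==0 -> the axis never binds (empty list).
--     if step > 0:
--         return [(bound - 1 - base) // step]
--     if step < 0:
--         return [base // (-step)]
--     return []
--
-- def check_branch(x1, y1, x2, y2, H, L):
--     dx = x1 - x2
--     dy = y1 - y2
--     if not (0 <= x1 + dx < L and 0 <= y1 + dy < H):
--         return []
--     bounds = axis_kmax(x1, dx, L) + axis_kmax(y1, dy, H)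
--     if not bounds:
--         return []  # both steps zero: the extrapolated point never leaves the map
--     k_max = min(bounds)
--     return [get_pos_from_xy(x1 + k * dx, y1 + k * dy, L) for k in range(1, k_max + 1)]
-- ===== Notes on version B (the rewrite author's own statement) =====
-- stated objective: faster
-- what changed: Replaces the incremental while-loop that re-tests every extrapolated point with a closed-form per-axis bound on K (one floor division per axis), taking the minimum and emitting the positions with a single range comprehension.
import Mathlib
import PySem

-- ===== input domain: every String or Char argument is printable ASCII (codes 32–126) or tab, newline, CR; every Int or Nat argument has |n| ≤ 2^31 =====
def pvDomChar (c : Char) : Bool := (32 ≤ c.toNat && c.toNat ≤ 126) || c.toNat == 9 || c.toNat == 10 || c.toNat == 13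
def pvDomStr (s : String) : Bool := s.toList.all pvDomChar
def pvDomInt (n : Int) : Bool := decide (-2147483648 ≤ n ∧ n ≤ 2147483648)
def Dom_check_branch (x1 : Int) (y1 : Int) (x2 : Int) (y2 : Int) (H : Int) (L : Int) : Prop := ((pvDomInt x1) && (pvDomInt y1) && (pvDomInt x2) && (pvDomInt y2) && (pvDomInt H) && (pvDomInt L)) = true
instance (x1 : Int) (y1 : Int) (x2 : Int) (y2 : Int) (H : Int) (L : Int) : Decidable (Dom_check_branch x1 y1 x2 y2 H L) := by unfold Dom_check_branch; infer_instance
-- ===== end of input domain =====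

-- B replaces A's incremental while-loop with a closed-form per-axis bound on K (one
-- floor division per axis) followed by a single range comprehension: a constant-factor
-- speedup in finding where the line leaves the map.


-- ===== PORT A =====
def get_pos_from_xy (x y L : Int) : Int := y * L + x

-- A's 'while True' loop; fuel makes it total (under Pre_ the loop terminates well
-- within (L+H).toNat + 2 iterations, proved below).
def loopA (x1 y1 x2 y2 H L : Int) : Nat → Int → List Int → List Int
  | 0, _, acc => acc
  | fuel + 1, K, acc =>
    let xa := (K + 1) * x1 - K * x2
    let ya := (K + 1) * y1 - K * y2
    if 0 ≤ xa ∧ xa < L ∧ 0 ≤ ya ∧ ya < H then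
      loopA x1 y1 x2 y2 H L fuel (K + 1) (acc ++ [get_pos_from_xy xa ya L])
    else acc

def check_branch (x1 : Int) (y1 : Int) (x2 : Int) (y2 : Int) (H : Int) (L : Int) : List Int :=
  loopA x1 y1 x2 y2 H L ((L + H).toNat + 2) 1 []

-- ===== PORT B =====
-- bounds on K from 0 <= base + K*step < bound, given it holds at K=1
def axis_kmax (base step bound : Int) : List Int :=
  if step > 0 then [PySem.Int.floordiv (bound - 1 - base) step]
  else if step < 0 then [PySem.Int.floordiv base (-step)]
  else []

def check_branch_alt (x1 : Int) (y1 : Int) (x2 : Int) (y2 : Int) (H : Int) (L : Int) : List Int :=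
  let dx := x1 - x2
  let dy := y1 - y2
  if 0 ≤ x1 + dx ∧ x1 + dx < L ∧ 0 ≤ y1 + dy ∧ y1 + dy < H then
    match axis_kmax x1 dx L ++ axis_kmax y1 dy H with
    | [] => []  -- both steps zero: the extrapolated point never leaves the map
    | b :: bs =>
      let k_max := bs.foldl min b
      (PySem.List.pyRange 1 (k_max + 1) 1).map
        (fun k => get_pos_from_xy (x1 + k * dx) (y1 + k * dy) L)
  else []

-- ===== PRECONDITION & SPEC =====
-- Pre_ excludes only the inputs on which A never returns: both steps zero with the
-- starting point inside the map, where A's while-loop re-tests the same point forever.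
def Pre_check_branch (x1 : Int) (y1 : Int) (x2 : Int) (y2 : Int) (H : Int) (L : Int) : Prop :=
  ¬ (x1 = x2 ∧ y1 = y2 ∧ 0 ≤ x1 ∧ x1 < L ∧ 0 ≤ y1 ∧ y1 < H)
instance (x1 : Int) (y1 : Int) (x2 : Int) (y2 : Int) (H : Int) (L : Int) : Decidable (Pre_check_branch x1 y1 x2 y2 H L) := by unfold Pre_check_branch; infer_instance

def pvWitness_check_branch : Int × Int × Int × Int × Int × Int := (2, 2, 1, 1, 5, 5)

def Spec_check_branch (x1 : Int) (y1 : Int) (x2 : Int) (y2 : Int) (H : Int) (L : Int) (out : List Int) : Prop := out = check_branch_alt x1 y1 x2 y2 H L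
instance (x1 : Int) (y1 : Int) (x2 : Int) (y2 : Int) (H : Int) (L : Int) (out : List Int) : Decidable (Spec_check_branch x1 y1 x2 y2 H L out) := by unfold Spec_check_branch; infer_instance

-- ===== CLAIM (what is proved, stated in full; the proofs are below) =====
def Claim_equal_check_branch : Prop := ∀ (x1 : Int) (y1 : Int) (x2 : Int) (y2 : Int) (H : Int) (L : Int), Dom_check_branch x1 y1 x2 y2 H L → Pre_check_branch x1 y1 x2 y2 H L → Spec_check_branch x1 y1 x2 y2 H L (check_branch x1 y1 x2 y2 H L)

-- ===== LEMMAS AND PROOFS =====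

-- one axis: for K ≥ 1 the in-range test is exactly "K ≤ every bound axis_kmax returns"
lemma axis_char (base step bound k : Int)
    (h0 : 0 ≤ base + step) (h1 : base + step < bound) (hk : 1 ≤ k) :
    ((0 ≤ base + k * step ∧ base + k * step < bound) ↔
      ∀ b ∈ axis_kmax base step bound, k ≤ b) := by
  unfold axis_kmax
  rcases lt_trichotomy step 0 with hs | hs | hs
  · rw [if_neg (by omega : ¬ step > 0), if_pos hs]
    simp only [List.mem_singleton, forall_eq]
    rw [PySem.Int.le_floordiv_iff_mul_le (by omega : (0:Int) < -step)]
    have hup : base + k * step < bound := by nlinarith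
    constructor
    · rintro ⟨hlo, -⟩; nlinarith
    · intro h; exact ⟨by nlinarith, hup⟩
  · subst hs
    rw [if_neg (by omega : ¬ (0:Int) > 0), if_neg (by omega : ¬ (0:Int) < 0)]
    constructor
    · intro _ b hb; simp at hb
    · intro _; constructor <;> omega
  · rw [if_pos hs]
    simp only [List.mem_singleton, forall_eq]
    rw [PySem.Int.le_floordiv_iff_mul_le hs]
    have hlo : 0 ≤ base + k * step := by nlinarith
    constructor
    · rintro ⟨-, hup⟩; nlinarith
    · intro h; exact ⟨hlo, by nlinarith⟩

lemma le_foldl_min (k b : Int) (bs : List Int) :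
    k ≤ bs.foldl min b ↔ (k ≤ b ∧ ∀ x ∈ bs, k ≤ x) := by
  induction bs generalizing b with
  | nil => simp
  | cons c cs ih =>
    simp only [List.foldl_cons, ih, List.mem_cons, le_min_iff]
    constructor
    · rintro ⟨⟨h1, h2⟩, h3⟩; exact ⟨h1, fun x hx => by rcases hx with rfl | hx; exact h2; exact h3 x hx⟩
    · rintro ⟨h1, h2⟩; exact ⟨⟨h1, h2 c (Or.inl rfl)⟩, fun x hx => h2 x (Or.inr hx)⟩

lemma axis_kmax_ne_nil (base step bound : Int) (h : step ≠ 0) :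
    axis_kmax base step bound ≠ [] := by
  unfold axis_kmax
  rcases lt_trichotomy step 0 with h' | h' | h'
  · rw [if_neg (by omega : ¬ step > 0), if_pos h']; simp
  · exact absurd h' h
  · rw [if_pos h']; simp

-- A's loop, given the characterisation "in-map at K ↔ K ≤ M", equals the tail of B's range
lemma loopA_eq (x1 y1 x2 y2 H L M : Int)
    (hchar : ∀ k : Int, 1 ≤ k →
      ((0 ≤ x1 + k * (x1 - x2) ∧ x1 + k * (x1 - x2) < L ∧
        0 ≤ y1 + k * (y1 - y2) ∧ y1 + k * (y1 - y2) < H) ↔ k ≤ M)) :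
    ∀ (fuel : Nat) (K : Int) (acc : List Int), 1 ≤ K → M + 1 - K < (fuel : Int) →
      loopA x1 y1 x2 y2 H L fuel K acc =
        acc ++ (PySem.List.pyRange K (M + 1) 1).map
          (fun k => get_pos_from_xy (x1 + k * (x1 - x2)) (y1 + k * (y1 - y2)) L) := by
  intro fuel
  induction fuel with
  | zero =>
    intro K acc hK hf
    rw [PySem.List.pyRange_one_eq_nil (by exact_mod_cast (by push_cast at hf; omega : M + 1 ≤ K))]
    simp [loopA]
  | succ n ih =>
    intro K acc hK hf
    have hxa : (K + 1) * x1 - K * x2 = x1 + K * (x1 - x2) := by ring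
    have hya : (K + 1) * y1 - K * y2 = y1 + K * (y1 - y2) := by ring
    by_cases hin : 0 ≤ x1 + K * (x1 - x2) ∧ x1 + K * (x1 - x2) < L ∧
        0 ≤ y1 + K * (y1 - y2) ∧ y1 + K * (y1 - y2) < H
    · have hKM : K ≤ M := (hchar K hK).mp hin
      rw [PySem.List.pyRange_one_cons (by omega : K < M + 1)]
      simp only [loopA, hxa, hya]
      rw [if_pos (by tauto : 0 ≤ x1 + K * (x1 - x2) ∧ x1 + K * (x1 - x2) < L ∧
            0 ≤ y1 + K * (y1 - y2) ∧ y1 + K * (y1 - y2) < H)]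
      rw [ih (K + 1) _ (by omega) (by push_cast at hf ⊢; omega)]
      simp
    · have hKM : ¬ K ≤ M := fun h => hin ((hchar K hK).mpr h)
      rw [PySem.List.pyRange_one_eq_nil (by omega : M + 1 ≤ K)]
      simp only [loopA, hxa, hya]
      rw [if_neg (by tauto)]
      simp

-- ===== VERDICT (by name: the statement is the Claim_ definition above) =====
theorem check_branch_spec : Claim_equal_check_branch := by
  intro x1 y1 x2 y2 H L _ hpre
  unfold Spec_check_branch check_branch check_branch_alt
  set dx := x1 - x2 with hdx
  set dy := y1 - y2 with hdy
  by_cases hin1 : 0 ≤ x1 + dx ∧ x1 + dx < L ∧ 0 ≤ y1 + dy ∧ y1 + dy < H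
  · -- the K=1 point is in the map
    obtain ⟨h0x, h1x, h0y, h1y⟩ := hin1
    -- the bounds list is nonempty (Pre_ rules out dx = dy = 0 here)
    have hne : dx ≠ 0 ∨ dy ≠ 0 := by
      by_contra hc
      push Not at hc
      exact hpre ⟨by omega, by omega, by omega, by omega, by omega, by omega⟩
    have hxc := fun k hk => axis_char x1 dx L k h0x h1x hk
    have hyc := fun k hk => axis_char y1 dy H k h0y h1y hk
    rcases hbl : axis_kmax x1 dx L ++ axis_kmax y1 dy H with _ | ⟨b, bs⟩
    · -- impossible: some step is nonzero, so its axis contributes a bound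
      exfalso
      rcases hne with h | h
      · have := axis_kmax_ne_nil x1 dx L h
        simp only [List.append_eq_nil_iff] at hbl; tauto
      · have := axis_kmax_ne_nil y1 dy H h
        simp only [List.append_eq_nil_iff] at hbl; tauto
    · set M := bs.foldl min b with hM
      have hchar : ∀ k : Int, 1 ≤ k →
          ((0 ≤ x1 + k * dx ∧ x1 + k * dx < L ∧ 0 ≤ y1 + k * dy ∧ y1 + k * dy < H) ↔ k ≤ M) := by
        intro k hk
        rw [hM, le_foldl_min]
        have hmem : ∀ z, z ∈ axis_kmax x1 dx L ++ axis_kmax y1 dy H ↔ z ∈ b :: bs := by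
          intro z; rw [hbl]
        constructor
        · rintro ⟨a1, a2, a3, a4⟩
          have hx := (hxc k hk).mp ⟨a1, a2⟩
          have hy := (hyc k hk).mp ⟨a3, a4⟩
          have hall : ∀ z ∈ b :: bs, k ≤ z := by
            intro z hz
            rcases List.mem_append.mp ((hmem z).mpr hz) with h | h
            · exact hx z h
            · exact hy z h
          exact ⟨hall b (List.mem_cons_self), fun x hx' => hall x (List.mem_cons_of_mem _ hx')⟩
        · rintro ⟨hb, hbs⟩
          have hall : ∀ z ∈ axis_kmax x1 dx L ++ axis_kmax y1 dy H, k ≤ z := by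
            intro z hz
            rcases List.mem_cons.mp ((hmem z).mp hz) with rfl | h
            · exact hb
            · exact hbs z h
          have hx := (hxc k hk).mpr (fun z hz => hall z (List.mem_append.mpr (Or.inl hz)))
          have hy := (hyc k hk).mpr (fun z hz => hall z (List.mem_append.mpr (Or.inr hz)))
          exact ⟨hx.1, hx.2, hy.1, hy.2⟩
      -- bound the fuel: M ≤ L + H
      have hM1 : 1 ≤ M := (hchar 1 (le_refl 1)).mp (by constructor <;> [skip; constructor] <;> [simpa using h0x; simpa using h1x; exact ⟨by simpa using h0y, by simpa using h1y⟩])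
      have hPM := (hchar M hM1).mpr (le_refl M)
      have hHpos : 1 ≤ H := by omega
      have hLpos : 1 ≤ L := by omega
      have hMLH : M ≤ L + H := by
        rcases hne with h | h
        · -- x-axis moves: |(M-1)*dx| ≤ L-1 and |dx| ≥ 1 force M ≤ L
          have hb1 : 0 ≤ x1 + 1 * dx := by simpa using h0x
          have hb2 : x1 + 1 * dx < L := by simpa using h1x
          rcases lt_or_gt_of_ne h with h' | h' <;> nlinarith [hPM.1, hPM.2.1]
        · have hb1 : 0 ≤ y1 + 1 * dy := by simpa using h0y
          have hb2 : y1 + 1 * dy < H := by simpa using h1y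
          rcases lt_or_gt_of_ne h with h' | h' <;> nlinarith [hPM.2.2.1, hPM.2.2.2]
      have hfuel : M + 1 - 1 < (((L + H).toNat + 2 : Nat) : Int) := by
        push_cast
        have : ((L + H).toNat : Int) = L + H := Int.toNat_of_nonneg (by omega)
        omega
      rw [loopA_eq x1 y1 x2 y2 H L M hchar ((L + H).toNat + 2) 1 [] (le_refl 1) hfuel]
      rw [if_pos ⟨h0x, h1x, h0y, h1y⟩, hbl]
      simp only [List.nil_append, ← hdx, ← hdy, ← hM]
  · -- K=1 already off-map: both return []
    have hxa : (1 + 1) * x1 - 1 * x2 = x1 + 1 * dx := by rw [hdx]; ring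
    have hya : (1 + 1) * y1 - 1 * y2 = y1 + 1 * dy := by rw [hdy]; ring
    rw [if_neg hin1]
    show loopA x1 y1 x2 y2 H L ((L + H).toNat + 2) 1 [] = []
    simp only [loopA, hxa, hya]
    rw [if_neg (by simpa using hin1)]
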